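-- pv_equiv track=rewrite | github.com/lucasng32/mase | src/chop/models/chronos2/triton_bucketed_attn.py | _bucket_for_size
-- ===== SOURCE A (Python) =====
-- _BUCKET_THRESHOLDS = [2, 4, 8, 16, 32, 64]
--
-- def _bucket_for_size(size: int) -> int:
--     """Return the smallest bucket threshold >= *size*."""
--     for b in _BUCKET_THRESHOLDS:
--         if size <= b:
--             return b
--     # size > 64: next power of 2
--     p = 128
--     while p < size:
--         p <<= 1
--     return p
-- ===== SOURCE B (Python) =====
-- def _bucket_for_size(size: int) -> int:
--     """Return the smallest bucket threshold >= *size*."""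
--     if size <= 2:
--         return 2
--     return 1 << (size - 1).bit_length()
-- ===== Notes on version B (the rewrite author's own statement) =====
-- stated objective: simpler
-- what changed: Replaced the threshold-list scan plus doubling loop with a single closed form: clamp to the minimum bucket 2, otherwise 1 << (size-1).bit_length(), the smallest power of two >= size.
import Mathlib
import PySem

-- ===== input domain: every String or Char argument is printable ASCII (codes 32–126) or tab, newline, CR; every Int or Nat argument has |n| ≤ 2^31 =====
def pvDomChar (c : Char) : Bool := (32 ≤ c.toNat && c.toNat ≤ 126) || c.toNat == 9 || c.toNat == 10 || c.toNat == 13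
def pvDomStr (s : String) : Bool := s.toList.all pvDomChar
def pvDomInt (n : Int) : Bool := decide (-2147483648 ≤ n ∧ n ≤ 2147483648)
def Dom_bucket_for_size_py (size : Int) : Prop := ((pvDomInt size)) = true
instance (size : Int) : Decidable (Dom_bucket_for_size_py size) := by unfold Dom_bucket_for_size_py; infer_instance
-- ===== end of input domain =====

-- B replaces A's list scan + doubling loop with a closed form (min-bucket clamp, then
-- smallest power of two >= size via bit_length); return values proved equal for every Int.
-- ===== PORT A =====
def pvBucketThresholds : List Int := [2, 4, 8, 16, 32, 64]

-- the `for b in _BUCKET_THRESHOLDS: if size <= b: return b` loop, early return = some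
def pvScanThresholds (size : Int) : List Int → Option Int
  | [] => none
  | b :: rest => if size ≤ b then some b else pvScanThresholds size rest

-- the `while p < size: p <<= 1` loop; the 1 ≤ p invariant is carried for termination
def pvBucketLoop (size p : Int) (hp : 1 ≤ p) : Int :=
  if h : p < size then pvBucketLoop size (p * 2) (by omega) else p
termination_by (size - p).toNat
decreasing_by omega

def bucket_for_size_py (size : Int) : Int :=
  match pvScanThresholds size pvBucketThresholds with
  | some b => b
  | none => pvBucketLoop size 128 (by norm_num)

-- ===== PORT B =====
-- Python's n.bit_length() for n >= 0 (exact on the nonnegative arguments B uses)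
def pvBitLength (n : Nat) : Nat := if n = 0 then 0 else n.log2 + 1

def bucket_for_size_py_alt (size : Int) : Int :=
  if size ≤ 2 then 2 else (1 : Int) <<< pvBitLength (size - 1).toNat
-- ===== PRECONDITION & SPEC =====
def Spec_bucket_for_size_py (size : Int) (out : Int) : Prop := out = bucket_for_size_py_alt size
instance (size : Int) (out : Int) : Decidable (Spec_bucket_for_size_py size out) := by unfold Spec_bucket_for_size_py; infer_instance

-- ===== CLAIM (what is proved, stated in full; the proofs are below) =====
def Claim_equal_bucket_for_size_py : Prop := ∀ (size : Int), Dom_bucket_for_size_py size → Spec_bucket_for_size_py size (bucket_for_size_py size)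

-- ===== LEMMAS AND PROOFS =====

lemma log2_ge {n k : Nat} (h : 2 ^ k ≤ n) : k ≤ n.log2 := by
  have hn : n ≠ 0 := by have := Nat.one_le_two_pow (n := k); omega
  rw [Nat.log2_eq_log_two]
  exact (Nat.le_log_iff_pow_le Nat.one_lt_two hn).mpr h

lemma log2_lt {n : Nat} : n < 2 ^ (n.log2 + 1) := by
  rcases Nat.eq_zero_or_pos n with h | h
  · simp [h]
  · rw [Nat.log2_eq_log_two]
    exact Nat.lt_pow_succ_log_self Nat.one_lt_two n

lemma loop_spec (n : Nat) (hn : 1 ≤ n) :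
    ∀ d k (p : Int), d = n.log2 + 1 - k → k ≤ n.log2 + 1 → p = (2:Int) ^ k →
      ∀ (hp : (1:Int) ≤ p),
      pvBucketLoop ((n : Int) + 1) p hp = (2:Int) ^ (n.log2 + 1) := by
  intro d
  induction d with
  | zero =>
    intro k p hd hk hpk hp
    have hk' : k = n.log2 + 1 := by omega
    subst hk' hpk
    rw [pvBucketLoop]
    have hlt : (n : Int) < (2:Int) ^ (n.log2 + 1) := by
      have := @log2_lt n
      exact_mod_cast Int.ofNat_lt.mpr this
    rw [dif_neg (by omega)]
  | succ d ih =>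
    intro k p hd hk hpk hp
    rw [pvBucketLoop]
    by_cases h : p < (n : Int) + 1
    · rw [dif_pos h]
      have hk2 : k ≤ n.log2 := by
        have hle : (2:Nat) ^ k ≤ n := by
          have h2 : (2:Int) ^ k ≤ (n : Int) := by rw [← hpk]; omega
          exact_mod_cast h2
        exact log2_ge hle
      exact ih (k + 1) (p * 2) (by omega) (by omega) (by rw [hpk]; ring) _
    · rw [dif_neg h]
      -- p = 2^k ≥ n+1 forces k = n.log2 + 1
      have hge : (n : Int) + 1 ≤ p := by omega
      have hgeN : n + 1 ≤ 2 ^ k := by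
        have h2 : ((n:Int) + 1) ≤ (2:Int) ^ k := by rw [← hpk]; omega
        exact_mod_cast h2
      have hself : 2 ^ n.log2 ≤ n := Nat.log2_self_le (by omega)
      have hk' : k = n.log2 + 1 := by
        by_contra hne
        have hkle : k ≤ n.log2 := by omega
        have : (2:Nat) ^ k ≤ 2 ^ n.log2 := Nat.pow_le_pow_right (by norm_num) hkle
        omega
      rw [hpk, hk']

lemma alt_big {size : Int} (h : 2 < size) :
    bucket_for_size_py_alt size = (2:Int) ^ ((size - 1).toNat.log2 + 1) := by
  have hn : (size - 1).toNat ≠ 0 := by omega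
  have hb : pvBitLength (size - 1).toNat = (size - 1).toNat.log2 + 1 := by
    unfold pvBitLength; rw [if_neg hn]
  simp only [bucket_for_size_py_alt, if_neg (show ¬ size ≤ 2 by omega), hb,
    Int.shiftLeft_eq, one_mul]

lemma main_eq (size : Int) : bucket_for_size_py_alt size = bucket_for_size_py size := by
  by_cases h64 : size ≤ 64
  · by_cases h2 : size ≤ 2
    · simp [bucket_for_size_py, bucket_for_size_py_alt, pvScanThresholds, pvBucketThresholds, h2]
    · have h3 : 3 ≤ size := by omega
      interval_cases size <;> decide
  · -- size > 64: A runs the doubling loop from 128, B takes the closed form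
    set n := (size - 1).toNat with hn
    have hcast : (n : Int) = size - 1 := Int.toNat_of_nonneg (by omega)
    have hs : size = (n : Int) + 1 := by omega
    have hn64 : 64 ≤ n := by omega
    have hlog : 6 ≤ n.log2 := log2_ge (by omega)
    have hA : bucket_for_size_py size = pvBucketLoop size 128 (by norm_num) := by
      simp [bucket_for_size_py, pvScanThresholds, pvBucketThresholds,
        if_neg (show ¬ size ≤ 2 by omega), if_neg (show ¬ size ≤ 4 by omega),
        if_neg (show ¬ size ≤ 8 by omega), if_neg (show ¬ size ≤ 16 by omega),
        if_neg (show ¬ size ≤ 32 by omega), if_neg (show ¬ size ≤ 64 by omega)]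
    rw [hA, alt_big (by omega)]
    rw [show pvBucketLoop size 128 (by norm_num) = pvBucketLoop ((n:Int)+1) 128 (by norm_num) by rw [← hs]]
    exact (loop_spec n (by omega) (n.log2 + 1 - 7) 7 128 rfl (by omega) (by norm_num) _).symm

-- ===== VERDICT (by name: the statement is the Claim_ definition above) =====
theorem bucket_for_size_py_spec : Claim_equal_bucket_for_size_py := by
  intro size _
  unfold Spec_bucket_for_size_py
  exact (main_eq size).symm
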